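-- pv_equiv track=rewrite | github.com/bhagyabanghadai/MemVra | memvra-brain/core/trm_compressor.py | _group_by_topic
-- ===== SOURCE A (Python) =====
-- from typing import Dict, List
--
-- def _group_by_topic(facts: List[Dict]) -> Dict[str, List[Dict]]:
--     """Group facts by detected topic/domain"""
--     grouped = {}
--
--     # Simple keyword-based grouping
--     keywords = {
--         "UI": ["ui", "interface", "design", "theme", "dark", "light"],
--         "Coding": ["code", "programming", "typescript", "javascript", "python"],
--         "Performance": ["performance", "optimize", "speed", "fast", "slow"],
--         "Tools": ["tool", "editor", "vscode", "ide"],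
--         "Preferences": ["prefer", "like", "favorite", "love", "hate"]
--     }
--
--     for fact in facts:
--         content = fact.get("content", "").lower()
--         matched_topic = "General"
--
--         for topic, topic_keywords in keywords.items():
--             if any(kw in content for kw in topic_keywords):
--                 matched_topic = topic
--                 break
--
--         if matched_topic not in grouped:
--             grouped[matched_topic] = []
--         grouped[matched_topic].append(fact)
--
--     return grouped
-- ===== SOURCE B (Python) =====
-- from typing import Dict, List
--
-- # Flat (keyword, topic) priority list: scanning it in order and taking the first
-- # keyword contained in the content picks the same topic as checking the topics
-- # one by one, because the keywords are grouped by topic in topic order.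
-- _KEYWORD_TOPICS = [
--     ("ui", "UI"), ("interface", "UI"), ("design", "UI"), ("theme", "UI"),
--     ("dark", "UI"), ("light", "UI"),
--     ("code", "Coding"), ("programming", "Coding"), ("typescript", "Coding"),
--     ("javascript", "Coding"), ("python", "Coding"),
--     ("performance", "Performance"), ("optimize", "Performance"),
--     ("speed", "Performance"), ("fast", "Performance"), ("slow", "Performance"),
--     ("tool", "Tools"), ("editor", "Tools"), ("vscode", "Tools"), ("ide", "Tools"),
--     ("prefer", "Preferences"), ("like", "Preferences"), ("favorite", "Preferences"),
--     ("love", "Preferences"), ("hate", "Preferences"),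
-- ]
--
-- def _classify(fact: Dict) -> str:
--     content = fact.get("content", "").lower()
--     for kw, topic in _KEYWORD_TOPICS:
--         if kw in content:
--             return topic
--     return "General"
--
-- def _group_by_topic(facts: List[Dict]) -> Dict[str, List[Dict]]:
--     """Group facts by detected topic/domain"""
--     labels = [_classify(fact) for fact in facts]
--     order = list(dict.fromkeys(labels))
--     return {t: [f for f, l in zip(facts, labels) if l == t] for t in order}
-- ===== Notes on version B (the rewrite author's own statement) =====
-- stated objective: alternative
-- what changed: A builds the grouped dict incrementally with an inner topic loop + break and a membership-test/append per fact; B classifies each fact by scanning one flat (keyword, topic) priority list, then builds the result in one shot as dedup of the label list plus one filter comprehension per topic over zip(facts, labels).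
import Mathlib
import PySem

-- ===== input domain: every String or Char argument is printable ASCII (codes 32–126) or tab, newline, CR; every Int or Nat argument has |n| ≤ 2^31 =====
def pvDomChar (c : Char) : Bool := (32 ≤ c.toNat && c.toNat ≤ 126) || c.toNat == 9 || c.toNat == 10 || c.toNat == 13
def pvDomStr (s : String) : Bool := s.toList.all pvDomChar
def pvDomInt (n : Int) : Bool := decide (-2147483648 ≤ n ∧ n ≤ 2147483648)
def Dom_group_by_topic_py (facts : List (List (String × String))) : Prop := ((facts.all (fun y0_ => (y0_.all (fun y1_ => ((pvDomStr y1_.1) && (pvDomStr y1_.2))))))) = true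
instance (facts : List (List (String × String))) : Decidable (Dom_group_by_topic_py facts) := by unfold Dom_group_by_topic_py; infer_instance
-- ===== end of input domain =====

-- B replaces A's per-fact dict-building loop (inner topic loop with break, membership
-- test + append) by a flat (keyword, topic) priority scan per fact, then a dedup of the
-- label list and one comprehension per topic; objective: alternative decomposition.

-- ===== PORT A =====
-- the literal `keywords` table of A
def pvKeywords : List (String × List String) :=
  [("UI", ["ui", "interface", "design", "theme", "dark", "light"]),
   ("Coding", ["code", "programming", "typescript", "javascript", "python"]),
   ("Performance", ["performance", "optimize", "speed", "fast", "slow"]),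
   ("Tools", ["tool", "editor", "vscode", "ide"]),
   ("Preferences", ["prefer", "like", "favorite", "love", "hate"])]

-- A's inner `for topic, topic_keywords in keywords.items(): if any(...): break` loop
def pvMatchTopic (kts : List (String × List String)) (content : List Char) : String :=
  match kts with
  | [] => "General"
  | (topic, kws) :: rest =>
    if kws.any (fun kw => PySem.Chars.isIn kw.toList content) then topic
    else pvMatchTopic rest content

def group_by_topic_py (facts : List (List (String × String))) : List (String × List (List (String × String))) :=
  -- `for fact in facts:` building `grouped`
  let grouped := facts.foldl (fun g fact =>
    let content := PySem.Chars.lower ((PySem.Dict.mk fact).getD "content" "").toList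
    let matchedTopic := pvMatchTopic pvKeywords content
    let g := if g.contains matchedTopic then g else g.insert matchedTopic []
    g.modify matchedTopic [] (fun l => l ++ [fact])) PySem.Dict.empty
  grouped.items

-- ===== PORT B =====
-- B's flat `_KEYWORD_TOPICS` priority list
def pvFlatKeywords : List (String × String) :=
  [("ui", "UI"), ("interface", "UI"), ("design", "UI"), ("theme", "UI"),
   ("dark", "UI"), ("light", "UI"),
   ("code", "Coding"), ("programming", "Coding"), ("typescript", "Coding"),
   ("javascript", "Coding"), ("python", "Coding"),
   ("performance", "Performance"), ("optimize", "Performance"),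
   ("speed", "Performance"), ("fast", "Performance"), ("slow", "Performance"),
   ("tool", "Tools"), ("editor", "Tools"), ("vscode", "Tools"), ("ide", "Tools"),
   ("prefer", "Preferences"), ("like", "Preferences"), ("favorite", "Preferences"),
   ("love", "Preferences"), ("hate", "Preferences")]

-- B's `_classify`: first-match scan of the flat list (the for/return loop is find?)
def pvClassify (fact : List (String × String)) : String :=
  let content := PySem.Chars.lower ((PySem.Dict.mk fact).getD "content" "").toList
  match pvFlatKeywords.find? (fun p => PySem.Chars.isIn p.1.toList content) with
  | some p => p.2
  | none => "General"

def group_by_topic_py_alt (facts : List (List (String × String))) : List (String × List (List (String × String))) :=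
  let labels := facts.map pvClassify
  let order := PySem.List.dedup labels
  order.map (fun t => (t, ((facts.zip labels).filter (fun p => p.2 == t)).map (·.1)))

-- ===== PRECONDITION & SPEC =====
def Spec_group_by_topic_py (facts : List (List (String × String))) (out : List (String × List (List (String × String)))) : Prop := out = group_by_topic_py_alt facts
instance (facts : List (List (String × String))) (out : List (String × List (List (String × String)))) : Decidable (Spec_group_by_topic_py facts out) := by unfold Spec_group_by_topic_py; infer_instance

-- ===== CLAIM (what is proved, stated in full; the proofs are below) =====
def Claim_equal_group_by_topic_py : Prop := ∀ (facts : List (List (String × String))), Dom_group_by_topic_py facts → Spec_group_by_topic_py facts (group_by_topic_py facts)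

-- ===== LEMMAS AND PROOFS =====

-- first-match over the flat list of one topic's keyword block ++ rest
lemma pick_block (kws : List String) (t : String) (rest : List (String × String)) (content : List Char) :
    ((kws.map (fun k => (k, t))) ++ rest).find? (fun p => PySem.Chars.isIn p.1.toList content)
      = if kws.any (fun kw => PySem.Chars.isIn kw.toList content)
        then ((kws.find? (fun kw => PySem.Chars.isIn kw.toList content)).map (fun k => (k, t)))
        else rest.find? (fun p => PySem.Chars.isIn p.1.toList content) := by
  induction kws with
  | nil => simp
  | cons k ks ih =>
    by_cases h : PySem.Chars.isIn k.toList content = true <;>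
      simp [List.find?, h, ih]

-- A's topic loop equals B's flat first-match scan, generically over the table
lemma matchTopic_eq_flat (kts : List (String × List String)) (content : List Char) :
    pvMatchTopic kts content
      = (match (kts.flatMap (fun p => p.2.map (fun k => (k, p.1)))).find?
            (fun p => PySem.Chars.isIn p.1.toList content) with
         | some p => p.2
         | none => "General") := by
  induction kts with
  | nil => simp [pvMatchTopic]
  | cons p rest ih =>
    obtain ⟨t, kws⟩ := p
    rw [pvMatchTopic]
    simp only [List.flatMap_cons, pick_block]
    by_cases h : kws.any (fun kw => PySem.Chars.isIn kw.toList content) = true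
    · have hs : (kws.find? (fun kw => PySem.Chars.isIn kw.toList content)).isSome := by
        rcases List.any_eq_true.mp h with ⟨a, ha, hpa⟩
        exact List.find?_isSome.mpr ⟨a, ha, hpa⟩
      obtain ⟨k, hk⟩ := Option.isSome_iff_exists.mp hs
      simp [h, hk]
    · simp [h, ih]

-- per-fact label agreement
lemma classify_eq (fact : List (String × String)) :
    pvMatchTopic pvKeywords (PySem.Chars.lower ((PySem.Dict.mk fact).getD "content" "").toList)
      = pvClassify fact := by
  rw [matchTopic_eq_flat]
  rfl

-- zip-filter projection lemma (B's comprehension over zip(facts, labels))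
lemma zip_filter_map (f : α → β) [DecidableEq β] [BEq β] [LawfulBEq β] (xs : List α) (t : β) :
    (((xs.zip (xs.map f)).filter (fun p => p.2 == t)).map (·.1))
      = xs.filter (fun x => f x == t) := by
  induction xs with
  | nil => rfl
  | cons x xs ih =>
    by_cases h : f x == t <;> simp [List.filter, h, ih]

lemma dedup_append_single {α} [DecidableEq α] [BEq α] [LawfulBEq α] (l : List α) (x : α) :
    PySem.List.dedup (l ++ [x]) = if x ∈ l then PySem.List.dedup l else PySem.List.dedup l ++ [x] := by
  simp only [PySem.List.dedup_eq_ofList, PySem.Set.ofList_eq_foldl, List.foldl_append, List.foldl_cons, List.foldl_nil]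
  rw [← PySem.Set.ofList_eq_foldl]
  by_cases h : x ∈ l <;>
    simp [PySem.Set.add, PySem.Set.mem_ofList, h]

lemma items_foldl (f : List (String × String) → String) (facts : List (List (String × String))) :
    (facts.foldl (fun g fact =>
        let g' := if g.contains (f fact) then g else g.insert (f fact) []
        g'.modify (f fact) [] (fun l => l ++ [fact])) PySem.Dict.empty).items
      = (PySem.List.dedup (facts.map f)).map (fun t => (t, facts.filter (fun x => f x == t))) := by
  induction facts using List.reverseRecOn with
  | nil => rfl
  | append_singleton xs x ih =>
    rw [List.foldl_append, List.foldl_cons, List.foldl_nil]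
    set D := xs.foldl (fun g fact =>
        let g' := if g.contains (f fact) then g else g.insert (f fact) []
        g'.modify (f fact) [] (fun l => l ++ [fact])) PySem.Dict.empty with hD
    have hkeys : D.keys = PySem.List.dedup (xs.map f) := by
      simp only [PySem.Dict.keys, ih, List.map_map, Function.comp_def]
      simp
    have hnd : D.keys.Nodup := by rw [hkeys]; exact PySem.List.nodup_dedup _
    have hcont : D.contains (f x) = decide (f x ∈ xs.map f) := by
      rw [PySem.Dict.contains_eq_decide_mem_keys, hkeys]
      simp
    by_cases hm : f x ∈ xs.map f
    · -- the label of x is already a key: modify appends in place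
      have hc : D.contains (f x) = true := by rw [hcont]; simp [hm]
      have hmem : (f x, xs.filter (fun y => f y == f x)) ∈ D.items := by
        rw [ih]; exact List.mem_map.mpr ⟨f x, (PySem.List.mem_dedup _ _).mpr hm, rfl⟩
      have hget : D.get? (f x) = some (xs.filter (fun y => f y == f x)) :=
        PySem.Dict.get?_of_mem_items D hmem hnd
      have hgetD : D.getD (f x) [] = xs.filter (fun y => f y == f x) :=
        PySem.Dict.getD_of_get?_eq_some D [] hget
      simp only [hc, if_true, PySem.Dict.modify, hgetD]
      rw [PySem.Dict.items_insert_of_contains D _ hc, ih, List.map_map, List.map_append]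
      simp only [List.map_cons, List.map_nil]
      rw [dedup_append_single]
      simp only [hm, if_true, List.filter_append]
      refine List.map_congr_left (fun t ht => ?_)
      by_cases h : t = f x
      · simp [List.filter, h]
      · have h2 : (f x == t) = false := beq_eq_false_iff_ne.mpr (Ne.symm h)
        simp [List.filter, h2]
        exact fun hh => absurd hh h
    · -- fresh label: a new key is appended at the end
      have hc : D.contains (f x) = false := by rw [hcont]; simp [hm]
      simp only [hc, Bool.false_eq_true, if_false, PySem.Dict.modify,
        PySem.Dict.getD_insert_self, PySem.Dict.insert_insert_self, List.nil_append]
      rw [PySem.Dict.items_insert_of_not_contains D _ hc, ih, List.map_append]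
      simp only [List.map_cons, List.map_nil]
      rw [dedup_append_single]
      simp only [hm, if_false, List.map_append, List.filter_append]
      have hnil : xs.filter (fun y => f y == f x) = [] :=
        List.filter_eq_nil_iff.mpr (fun a ha hfa => hm (List.mem_map.mpr ⟨a, ha, by simpa using hfa⟩))
      refine congrArg₂ (· ++ ·) (List.map_congr_left (fun t ht => ?_)) ?_
      · have htm : t ∈ xs.map f := (PySem.List.mem_dedup _ _).mp ht
        have hne : f x ≠ t := fun h => hm (h ▸ htm)
        have h2 : (f x == t) = false := beq_eq_false_iff_ne.mpr hne
        simp [List.filter, h2]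
      · simp [List.filter, hnil]

theorem group_by_topic_py_spec : Claim_equal_group_by_topic_py := by
  intro facts _
  show group_by_topic_py facts = group_by_topic_py_alt facts
  unfold group_by_topic_py group_by_topic_py_alt
  have hfun : (fun (g : PySem.Dict String (List (List (String × String)))) fact =>
      let content := PySem.Chars.lower ((PySem.Dict.mk fact).getD "content" "").toList
      let matchedTopic := pvMatchTopic pvKeywords content
      let g := if g.contains matchedTopic then g else g.insert matchedTopic []
      g.modify matchedTopic [] (fun l => l ++ [fact]))
      = (fun (g : PySem.Dict String (List (List (String × String)))) fact =>
      let g' := if g.contains (pvClassify fact) then g else g.insert (pvClassify fact) []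
      g'.modify (pvClassify fact) [] (fun l => l ++ [fact])) := by
    funext g fact
    simp only [classify_eq]
  rw [hfun, items_foldl pvClassify facts]
  exact List.map_congr_left (fun t _ => by rw [zip_filter_map])
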